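-- pv_equiv track=rewrite | github.com/verwoerd/AoC2021 | day02/src/main/python/solution.py | execute_manual_route
-- ===== SOURCE A (Python) =====
-- def execute_manual_route(route):
--     depth = forward = aim = 0
--     for x in route:
--         direction = int(x[1])
--         if x[0] == 'forward':
--             forward += direction
--             depth += aim * direction
--         elif x[0] == 'down':
--             aim += direction
--         else:
--             aim -= direction
--     return depth * forward
-- ===== SOURCE B (Python) =====
-- from itertools import accumulate
--
-- def execute_manual_route(route):
--     deltas = [v if d == 'down' else (0 if d == 'forward' else -v) for d, v in route]
--     aims = list(accumulate(deltas))
--     fwds = [(a, v) for (d, v), a in zip(route, aims) if d == 'forward']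
--     forward = sum(v for _, v in fwds)
--     depth = sum(a * v for a, v in fwds)
--     return depth * forward
-- ===== Notes on version B (the rewrite author's own statement) =====
-- stated objective: alternative
-- what changed: Replaces A's single interleaved state-machine pass with a prefix-sum aim table (inclusive accumulate of signed deltas) followed by a separate weighted-sum pass over the forward steps.
import Mathlib
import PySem

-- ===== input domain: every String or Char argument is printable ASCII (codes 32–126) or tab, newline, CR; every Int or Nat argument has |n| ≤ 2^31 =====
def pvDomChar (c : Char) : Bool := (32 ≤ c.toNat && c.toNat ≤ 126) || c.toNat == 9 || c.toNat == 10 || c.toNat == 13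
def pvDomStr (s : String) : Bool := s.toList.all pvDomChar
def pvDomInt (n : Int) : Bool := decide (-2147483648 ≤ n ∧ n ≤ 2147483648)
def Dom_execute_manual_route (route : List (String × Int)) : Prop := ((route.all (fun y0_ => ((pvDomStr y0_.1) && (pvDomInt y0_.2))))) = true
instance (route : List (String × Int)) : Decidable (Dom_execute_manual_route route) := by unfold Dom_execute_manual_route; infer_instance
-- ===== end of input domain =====

-- B replaces A's interleaved (depth, forward, aim) pass by a prefix-sum aim table and a
-- separate weighted-sum pass over the forward steps; same cost, different decomposition.

-- ===== PORT A =====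
-- A's single loop over (depth, forward, aim); int(x[1]) is the identity on an int argument.
def execute_manual_route (route : List (String × Int)) : Int :=
  let s := route.foldl
    (fun (s : Int × Int × Int) x =>
      let direction := x.2
      if x.1 == "forward" then (s.1 + s.2.2 * direction, s.2.1 + direction, s.2.2)
      else if x.1 == "down" then (s.1, s.2.1, s.2.2 + direction)
      else (s.1, s.2.1, s.2.2 - direction))
    (0, 0, 0)
  s.1 * s.2.1

-- ===== PORT B =====
-- inclusive cumulative sum (itertools.accumulate)
def pvAccum : Int → List Int → List Int
  | _, [] => []
  | a, d :: ds => (a + d) :: pvAccum (a + d) ds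

def execute_manual_route_alt (route : List (String × Int)) : Int :=
  let deltas := route.map (fun x => if x.1 == "down" then x.2 else if x.1 == "forward" then 0 else -x.2)
  let aims := pvAccum 0 deltas
  let fwds := ((route.zip aims).filter (fun p => p.1.1 == "forward")).map (fun p => (p.2, p.1.2))
  let forward := (fwds.map (fun p => p.2)).sum
  let depth := (fwds.map (fun p => p.1 * p.2)).sum
  depth * forward

-- ===== PRECONDITION & SPEC =====
def Spec_execute_manual_route (route : List (String × Int)) (out : Int) : Prop := out = execute_manual_route_alt route
instance (route : List (String × Int)) (out : Int) : Decidable (Spec_execute_manual_route route out) := by unfold Spec_execute_manual_route; infer_instance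

-- ===== CLAIM (what is proved, stated in full; the proofs are below) =====
def Claim_equal_execute_manual_route : Prop := ∀ (route : List (String × Int)), Dom_execute_manual_route route → Spec_execute_manual_route route (execute_manual_route route)

-- ===== LEMMAS AND PROOFS =====

-- named forms of the inline lambdas (definitionally equal; proof-only helpers)
def pvStepA (s : Int × Int × Int) (x : String × Int) : Int × Int × Int :=
  if x.1 == "forward" then (s.1 + s.2.2 * x.2, s.2.1 + x.2, s.2.2)
  else if x.1 == "down" then (s.1, s.2.1, s.2.2 + x.2)
  else (s.1, s.2.1, s.2.2 - x.2)

def pvDelta (x : String × Int) : Int :=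
  if x.1 == "down" then x.2 else if x.1 == "forward" then 0 else -x.2

def pvFwds (a : Int) (route : List (String × Int)) : List (Int × Int) :=
  ((route.zip (pvAccum a (route.map pvDelta))).filter (fun p => p.1.1 == "forward")).map
    (fun p => (p.2, p.1.2))

-- common reference: (depth, forward) contributed by `route` when the current aim is `a`
def pvSpec : Int → List (String × Int) → Int × Int
  | _, [] => (0, 0)
  | a, x :: r =>
    if x.1 == "forward" then
      let p := pvSpec a r
      (a * x.2 + p.1, x.2 + p.2)
    else if x.1 == "down" then pvSpec (a + x.2) r
    else pvSpec (a - x.2) r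

lemma foldA_spec (route : List (String × Int)) : ∀ (d f a : Int),
    route.foldl pvStepA (d, f, a)
      = (d + (pvSpec a route).1, f + (pvSpec a route).2, a + (route.map pvDelta).sum) := by
  induction route with
  | nil => simp [pvSpec]
  | cons x r ih =>
    intro d f a
    by_cases hf : x.1 = "forward"
    · simp only [List.foldl_cons, pvStepA, pvSpec, pvDelta, List.map_cons, List.sum_cons,
        hf, beq_self_eq_true, if_true, ih, show ("forward" == "down") = false from rfl,
        Bool.false_eq_true, if_false, Prod.mk.injEq]
      and_intros <;> first | trivial | ring
    · by_cases hd : x.1 = "down"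
      · simp only [List.foldl_cons, pvStepA, pvSpec, pvDelta, List.map_cons, List.sum_cons,
          hd, beq_self_eq_true, if_true, ih, show ("down" == "forward") = false from rfl,
          Bool.false_eq_true, if_false, Prod.mk.injEq]
        and_intros <;> first | trivial | ring
      · have hf' : (x.1 == "forward") = false := by simp [hf]
        have hd' : (x.1 == "down") = false := by simp [hd]
        simp only [List.foldl_cons, pvStepA, pvSpec, pvDelta, List.map_cons, List.sum_cons,
          hf', hd', Bool.false_eq_true, if_false, ih, Prod.mk.injEq]
        and_intros <;> first | trivial | ring

lemma altB_spec (route : List (String × Int)) : ∀ (a : Int),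
    ((pvFwds a route).map (fun p => p.1 * p.2)).sum = (pvSpec a route).1
    ∧ ((pvFwds a route).map (fun p => p.2)).sum = (pvSpec a route).2 := by
  induction route with
  | nil => intro a; simp [pvFwds, pvSpec, pvAccum]
  | cons x r ih =>
    intro a
    have ih1 := (ih (a + pvDelta x)).1
    have ih2 := (ih (a + pvDelta x)).2
    simp only [pvFwds] at ih1 ih2
    by_cases hf : x.1 = "forward"
    · have hδ : pvDelta x = 0 := by simp [pvDelta, hf]
      rw [hδ, add_zero] at ih1 ih2
      simp only [pvFwds, List.map_cons, pvAccum, List.zip_cons_cons, List.filter_cons,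
        hf, beq_self_eq_true, if_true, List.sum_cons, pvSpec, hδ, add_zero]
      rw [ih1, ih2]
      exact ⟨rfl, rfl⟩
    · have hf' : (x.1 == "forward") = false := by simp [hf]
      by_cases hd : x.1 = "down"
      · have hδ : pvDelta x = x.2 := by simp [pvDelta, hd]
        rw [hδ] at ih1 ih2
        simp only [pvFwds, List.map_cons, pvAccum, List.zip_cons_cons, List.filter_cons,
          Bool.false_eq_true, if_false, pvSpec, hd, beq_self_eq_true, if_true,
          show ("down" == "forward") = false from rfl, hδ]
        exact ⟨ih1, ih2⟩
      · have hd' : (x.1 == "down") = false := by simp [hd]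
        have hδ : pvDelta x = -x.2 := by simp [pvDelta, hd', hf']
        rw [hδ, ← sub_eq_add_neg] at ih1 ih2
        simp only [pvFwds, List.map_cons, pvAccum, List.zip_cons_cons, List.filter_cons,
          hf', hd', Bool.false_eq_true, if_false, pvSpec, hδ, ← sub_eq_add_neg]
        exact ⟨ih1, ih2⟩

-- ===== VERDICT (by name: the statement is the Claim_ definition above) =====
theorem execute_manual_route_spec : Claim_equal_execute_manual_route := by
  intro route _
  unfold Spec_execute_manual_route
  show (route.foldl pvStepA (0, 0, 0)).1 * (route.foldl pvStepA (0, 0, 0)).2.1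
      = ((pvFwds 0 route).map (fun p => p.1 * p.2)).sum * ((pvFwds 0 route).map (fun p => p.2)).sum
  rw [foldA_spec route 0 0 0, (altB_spec route 0).1, (altB_spec route 0).2]
  simp
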